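-- pv_equiv track=rewrite | github.com/chin-yan/gcn_clustering | video_merger.py | _determine_target_resolution
-- ===== SOURCE A (Python) =====
-- def _determine_target_resolution(video_infos, resize_mode, custom_resolution):
--     """決定目標解析度"""
--     if resize_mode == 'custom' and custom_resolution:
--         return custom_resolution
--
--     resolutions = []
--     for info in video_infos:
--         res = info.get('resolution')
--         if res and 'x' in res:
--             try:
--                 w, h = map(int, res.split('x'))
--                 resolutions.append((w, h, w*h))  # width, height, pixels
--             except:
--                 continue
--
--     if not resolutions:
--         return None
--
--     if resize_mode == 'first':
--         return f"{resolutions[0][0]}x{resolutions[0][1]}"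
--     elif resize_mode == 'largest':
--         largest = max(resolutions, key=lambda x: x[2])
--         return f"{largest[0]}x{largest[1]}"
--     elif resize_mode == 'smallest':
--         smallest = min(resolutions, key=lambda x: x[2])
--         return f"{smallest[0]}x{smallest[1]}"
--
--     return None
-- ===== SOURCE B (Python) =====
-- def _determine_target_resolution(video_infos, resize_mode, custom_resolution):
--     """One streaming pass with a running best (no intermediate list);
--     early exit for 'first' and for unknown modes."""
--     if resize_mode == 'custom' and custom_resolution:
--         return custom_resolution
--     if resize_mode not in ('first', 'largest', 'smallest'):
--         return None
--     best = None
--     for info in video_infos: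
--         parsed = _parse_resolution(info.get('resolution'))
--         if parsed is None:
--             continue
--         if resize_mode == 'first':
--             return f"{parsed[0]}x{parsed[1]}"
--         if best is None:
--             best = parsed
--         elif resize_mode == 'largest' and parsed[2] > best[2]:
--             best = parsed
--         elif resize_mode == 'smallest' and parsed[2] < best[2]:
--             best = parsed
--     if best is None:
--         return None
--     return f"{best[0]}x{best[1]}"
--
--
-- def _parse_resolution(res):
--     if not res or 'x' not in res:
--         return None
--     parts = res.split('x')
--     if len(parts) != 2:
--         return None
--     try:
--         w, h = int(parts[0]), int(parts[1])
--     except ValueError: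
--         return None
--     return (w, h, w * h)
-- ===== Notes on version B (the rewrite author's own statement) =====
-- stated objective: alternative
-- what changed: Replaces A's build-a-resolutions-list-then-max/min/index with a single streaming pass keeping one running best tuple, with early exits for the 'first' mode (stops at the first parsable resolution) and for unknown modes (no scan at all).
import Mathlib
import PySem

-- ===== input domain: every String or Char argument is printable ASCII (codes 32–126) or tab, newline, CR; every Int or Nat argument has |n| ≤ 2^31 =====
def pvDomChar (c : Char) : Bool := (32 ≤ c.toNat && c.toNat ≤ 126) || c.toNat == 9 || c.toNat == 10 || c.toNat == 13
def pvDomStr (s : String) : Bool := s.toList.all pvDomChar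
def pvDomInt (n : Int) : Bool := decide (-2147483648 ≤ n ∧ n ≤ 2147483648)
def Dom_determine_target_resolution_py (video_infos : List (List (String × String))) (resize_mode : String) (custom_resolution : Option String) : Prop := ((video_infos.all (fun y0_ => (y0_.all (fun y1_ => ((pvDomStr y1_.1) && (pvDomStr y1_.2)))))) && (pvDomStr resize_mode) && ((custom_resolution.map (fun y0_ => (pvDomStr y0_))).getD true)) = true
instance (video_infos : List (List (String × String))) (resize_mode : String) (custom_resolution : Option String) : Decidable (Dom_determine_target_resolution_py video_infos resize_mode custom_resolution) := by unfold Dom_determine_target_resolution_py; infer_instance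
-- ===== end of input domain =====

-- B replaces A's build-resolutions-list-then-max/min/index by a single streaming pass with one
-- running best tuple, returning early for the 'first' mode and for unknown modes; same results.

-- ===== PORT A =====
-- literal transliteration of _determine_target_resolution; the try-block
-- 'w, h = map(int, res.split('x'))' appends iff the split has exactly two parts and both parse as
-- int (any other shape raises ValueError, caught by the bare except), which is what the match does.
def determine_target_resolution_py (video_infos : List (List (String × String))) (resize_mode : String) (custom_resolution : Option String) : Option String :=
  if resize_mode == "custom" && (match custom_resolution with | some s => !(s == "") | none => false) then
    custom_resolution
  else
    let resolutions : List (Int × Int × Int) :=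
      video_infos.foldl (fun acc info =>
        match PySem.Dict.get? (PySem.Dict.mk info) "resolution" with
        | none => acc
        | some res =>
          if !(res == "") && PySem.Str.isIn "x" res then
            match PySem.Str.split? res "x" with
            | some [a, b] =>
              match PySem.Int.ofStr? a, PySem.Int.ofStr? b with
              | some w, some h => acc ++ [(w, h, w * h)]
              | _, _ => acc
            | _ => acc
          else acc) []
    match resolutions with
    | [] => none
    | r0 :: _ =>
      if resize_mode == "first" then
        some (PySem.Int.toStr r0.1 ++ "x" ++ PySem.Int.toStr r0.2.1)
      else if resize_mode == "largest" then
        match PySem.List.max? resolutions (fun x => x.2.2) with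
        | some m => some (PySem.Int.toStr m.1 ++ "x" ++ PySem.Int.toStr m.2.1)
        | none => none
      else if resize_mode == "smallest" then
        match PySem.List.min? resolutions (fun x => x.2.2) with
        | some m => some (PySem.Int.toStr m.1 ++ "x" ++ PySem.Int.toStr m.2.1)
        | none => none
      else none

-- ===== PORT B =====
-- _parse_resolution from Source B ('if not res or 'x' not in res' / 'len(parts) != 2' / int parse)
def pvParseResolution (res : Option String) : Option (Int × Int × Int) :=
  res.bind fun s =>
    if !(s == "") && PySem.Str.isIn "x" s then
      let parts := (PySem.Str.split? s "x").getD []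
      if parts.length = 2 then
        (PySem.Int.ofStr? (parts.getD 0 "")).bind fun w =>
          (PySem.Int.ofStr? (parts.getD 1 "")).map fun h => (w, h, w * h)
      else none
    else none

def pvFmtRes (r : Int × Int × Int) : String := PySem.Int.toStr r.1 ++ "x" ++ PySem.Int.toStr r.2.1

-- the for-loop of Source B: running best, early return on 'first'
def pvLoopB (mode : String) : List (List (String × String)) → Option (Int × Int × Int) → Option String
  | [], best => best.map pvFmtRes
  | info :: rest, best =>
    (pvParseResolution (PySem.Dict.get? (PySem.Dict.mk info) "resolution")).elim
      (pvLoopB mode rest best)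
      (fun p =>
        if mode == "first" then some (pvFmtRes p)
        else
          best.elim (pvLoopB mode rest (some p)) (fun b =>
            if mode == "largest" && p.2.2 > b.2.2 then pvLoopB mode rest (some p)
            else if mode == "smallest" && p.2.2 < b.2.2 then pvLoopB mode rest (some p)
            else pvLoopB mode rest (some b)))

def determine_target_resolution_py_alt (video_infos : List (List (String × String))) (resize_mode : String) (custom_resolution : Option String) : Option String :=
  if resize_mode == "custom" && (custom_resolution.map (fun s => !(s == ""))).getD false then
    custom_resolution
  else if !(resize_mode == "first" || resize_mode == "largest" || resize_mode == "smallest") then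
    none
  else
    pvLoopB resize_mode video_infos none

-- ===== PRECONDITION & SPEC =====
def Spec_determine_target_resolution_py (video_infos : List (List (String × String))) (resize_mode : String) (custom_resolution : Option String) (out : Option String) : Prop := out = determine_target_resolution_py_alt video_infos resize_mode custom_resolution
instance (video_infos : List (List (String × String))) (resize_mode : String) (custom_resolution : Option String) (out : Option String) : Decidable (Spec_determine_target_resolution_py video_infos resize_mode custom_resolution out) := by unfold Spec_determine_target_resolution_py; infer_instance

-- ===== CLAIM (what is proved, stated in full; the proofs are below) =====
def Claim_equal_determine_target_resolution_py : Prop := ∀ (video_infos : List (List (String × String))) (resize_mode : String) (custom_resolution : Option String), Dom_determine_target_resolution_py video_infos resize_mode custom_resolution → Spec_determine_target_resolution_py video_infos resize_mode custom_resolution (determine_target_resolution_py video_infos resize_mode custom_resolution)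

-- ===== LEMMAS AND PROOFS =====

def pvParseInfo (info : List (String × String)) : Option (Int × Int × Int) :=
  pvParseResolution (PySem.Dict.get? (PySem.Dict.mk info) "resolution")

theorem stepA_eq (acc : List (Int × Int × Int)) (info : List (String × String)) :
    (match PySem.Dict.get? (PySem.Dict.mk info) "resolution" with
      | none => acc
      | some res =>
        if !(res == "") && PySem.Str.isIn "x" res then
          match PySem.Str.split? res "x" with
          | some [a, b] =>
            match PySem.Int.ofStr? a, PySem.Int.ofStr? b with
            | some w, some h => acc ++ [(w, h, w * h)]
            | _, _ => acc
          | _ => acc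
        else acc)
    = acc ++ (pvParseInfo info).toList := by
  unfold pvParseInfo pvParseResolution
  cases PySem.Dict.get? (PySem.Dict.mk info) "resolution" with
  | none => simp
  | some res =>
    by_cases hg : (!(res == "") && PySem.Str.isIn "x" res) = true
    · obtain ⟨hne, hin⟩ := Bool.and_eq_true_iff.mp hg
      rw [Bool.not_eq_true', beq_eq_false_iff_ne] at hne
      have hin' : PySem.Chars.isIn ['x'] res.toList = true := hin
      simp only [hg, if_pos]
      cases hs : PySem.Str.split? res "x" with
      | none => simp [hs]
      | some parts =>
        rcases parts with _ | ⟨a, _ | ⟨b, _ | ⟨c, t⟩⟩⟩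
        · simp [hs]
        · simp [hs]
        · cases ha : PySem.Int.ofStr? a <;> cases hb : PySem.Int.ofStr? b <;> simp [hs, ha, hb, hne, hin']
        · simp [hs]
    · rw [Bool.not_eq_true] at hg
      simp at hg
      by_cases he : res = ""
      · simp [he]
      · simp [he, hg he]

theorem foldA_eq (vis : List (List (String × String))) (acc : List (Int × Int × Int)) :
    vis.foldl (fun acc info =>
      match PySem.Dict.get? (PySem.Dict.mk info) "resolution" with
      | none => acc
      | some res =>
        if !(res == "") && PySem.Str.isIn "x" res then
          match PySem.Str.split? res "x" with
          | some [a, b] =>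
            match PySem.Int.ofStr? a, PySem.Int.ofStr? b with
            | some w, some h => acc ++ [(w, h, w * h)]
            | _, _ => acc
          | _ => acc
        else acc) acc
    = acc ++ vis.filterMap pvParseInfo := by
  induction vis generalizing acc with
  | nil => simp
  | cons info rest ih =>
    rw [List.foldl_cons, stepA_eq, ih, List.filterMap_cons]
    cases pvParseInfo info <;> simp

theorem loopB_first (vis : List (List (String × String))) :
    pvLoopB "first" vis none = ((vis.filterMap pvParseInfo).head?).map pvFmtRes := by
  induction vis with
  | nil => simp [pvLoopB]
  | cons info rest ih =>
    rw [pvLoopB]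
    cases h : pvParseInfo info with
    | none =>
      unfold pvParseInfo at h
      simp [h, ih, List.filterMap_cons, pvParseInfo]
    | some p =>
      unfold pvParseInfo at h
      simp [h, List.filterMap_cons, pvParseInfo]

theorem loopB_largest (vis : List (List (String × String))) (best : Option (Int × Int × Int)) :
    pvLoopB "largest" vis best
      = ((vis.filterMap pvParseInfo).foldl (fun acc x =>
          match acc with
          | none => some x
          | some m => if m.2.2 < x.2.2 then some x else some m) best).map pvFmtRes := by
  induction vis generalizing best with
  | nil => simp [pvLoopB]
  | cons info rest ih =>
    rw [pvLoopB]
    cases h : pvParseInfo info with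
    | none =>
      unfold pvParseInfo at h
      simp [h, ih, List.filterMap_cons, pvParseInfo]
    | some p =>
      unfold pvParseInfo at h
      cases best with
      | none => simp [h, ih, List.filterMap_cons, pvParseInfo]
      | some b =>
        by_cases hlt : b.2.2 < p.2.2
        · simp [h, ih, List.filterMap_cons, pvParseInfo, hlt]
        · simp [h, ih, List.filterMap_cons, pvParseInfo, hlt]

theorem loopB_smallest (vis : List (List (String × String))) (best : Option (Int × Int × Int)) :
    pvLoopB "smallest" vis best
      = ((vis.filterMap pvParseInfo).foldl (fun acc x =>
          match acc with
          | none => some x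
          | some m => if x.2.2 < m.2.2 then some x else some m) best).map pvFmtRes := by
  induction vis generalizing best with
  | nil => simp [pvLoopB]
  | cons info rest ih =>
    rw [pvLoopB]
    cases h : pvParseInfo info with
    | none =>
      unfold pvParseInfo at h
      simp [h, ih, List.filterMap_cons, pvParseInfo]
    | some p =>
      unfold pvParseInfo at h
      cases best with
      | none => simp [h, ih, List.filterMap_cons, pvParseInfo]
      | some b =>
        by_cases hlt : p.2.2 < b.2.2
        · simp [h, ih, List.filterMap_cons, pvParseInfo, hlt]
        · simp [h, ih, List.filterMap_cons, pvParseInfo, hlt]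

theorem max?_eq_foldP (R : List (Int × Int × Int)) :
    PySem.List.max? R (fun x => x.2.2)
      = R.foldl (fun acc x =>
          match acc with
          | none => some x
          | some m => if m.2.2 < x.2.2 then some x else some m) none := by
  unfold PySem.List.max?
  congr 1
  funext acc x
  cases acc <;> rfl

theorem min?_eq_foldP (R : List (Int × Int × Int)) :
    PySem.List.min? R (fun x => x.2.2)
      = R.foldl (fun acc x =>
          match acc with
          | none => some x
          | some m => if x.2.2 < m.2.2 then some x else some m) none := by
  unfold PySem.List.min?
  congr 1
  funext acc x
  cases acc <;> rfl

-- ===== VERDICT (by name: the statement is the Claim_ definition above) =====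
theorem determine_target_resolution_py_spec : Claim_equal_determine_target_resolution_py := by
  intro vis mode custom hdom
  clear hdom
  unfold Spec_determine_target_resolution_py
  unfold determine_target_resolution_py determine_target_resolution_py_alt
  have hcb : ((custom.map (fun s => !(s == ""))).getD false)
      = (match custom with | some s => !(s == "") | none => false) := by
    cases custom <;> rfl
  rw [hcb]
  clear hcb
  by_cases hc : (mode == "custom" && (match custom with | some s => !(s == "") | none => false)) = true
  · rw [if_pos hc, if_pos hc]
  · rw [if_neg hc, if_neg hc]
    simp only [foldA_eq, List.nil_append]
    by_cases h1 : mode = "first"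
    · subst h1
      rw [loopB_first]
      cases hR : vis.filterMap pvParseInfo with
      | nil => simp
      | cons r0 rest => simp [pvFmtRes]
    · by_cases h2 : mode = "largest"
      · subst h2
        rw [loopB_largest]
        cases hR : vis.filterMap pvParseInfo with
        | nil => simp
        | cons r0 rest =>
          rw [max?_eq_foldP]
          cases hm : (r0 :: rest).foldl (fun acc x =>
              match acc with
              | none => some x
              | some m => if m.2.2 < x.2.2 then some x else some m) none with
          | none => simp [hm]
          | some m => simp [hm, pvFmtRes]
      · by_cases h3 : mode = "smallest"
        · subst h3
          rw [loopB_smallest]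
          cases hR : vis.filterMap pvParseInfo with
          | nil => simp
          | cons r0 rest =>
            rw [min?_eq_foldP]
            cases hm : (r0 :: rest).foldl (fun acc x =>
                match acc with
                | none => some x
                | some m => if x.2.2 < m.2.2 then some x else some m) none with
            | none => simp [hm]
            | some m => simp [hm, pvFmtRes]
        · have hb : (!(mode == "first" || mode == "largest" || mode == "smallest")) = true := by
            simp [h1, h2, h3]
          rw [if_pos hb]
          cases vis.filterMap pvParseInfo with
          | nil => simp
          | cons r0 rest => simp [h1, h2, h3]
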